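-- pv_equiv track=rewrite | github.com/mgdebayser/machine-learning | util/finch.py | getSenderName
-- ===== SOURCE A (Python) =====
-- def getSenderName(strSenderBin):
--
--     if(strSenderBin=="None"):
--         return "None"
--     names = []
--     for i in range(0,len(strSenderBin)):
--         if i == 0 and strSenderBin[i] == "1":
--             names.append("investimentoGuru")
--         if i == 1 and strSenderBin[i] == "1":
--             names.append("poupancaGuru")
--         if i == 2 and strSenderBin[i] == "1":
--             names.append("cdbGuru")
--         if i == 3 and strSenderBin[i] == "1":
--             names.append("tesouroGuru")
--         if i == 4 and strSenderBin[i] == "1":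
--             names.append("finch-user")
--
--     if len(names) == 0:
--         names.append("Unkown")
--     ret = ""
--     for i in range(0,len(names)):
--         if i != len(names)-1:
--             ret += names[i] + ","
--         else:
--             ret += names[i]
--     return ret
-- ===== SOURCE B (Python) =====
-- _NAMES = ("investimentoGuru", "poupancaGuru", "cdbGuru", "tesouroGuru", "finch-user")
-- # precomputed: every 5-bit flag mask -> its comma-joined name string (empty mask -> "Unkown")
-- _TABLE = {}
-- for _m in range(32):
--     _joined = ",".join(_NAMES[_b] for _b in range(5) if (_m >> _b) & 1)
--     _TABLE[_m] = _joined if _joined else "Unkown"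
--
-- def getSenderName(strSenderBin):
--     if strSenderBin == "None":
--         return "None"
--     mask = 0
--     for b, ch in enumerate(strSenderBin[:5]):
--         if ch == "1":
--             mask |= 1 << b
--     return _TABLE[mask]
-- ===== Notes on version B (the rewrite author's own statement) =====
-- stated objective: faster
-- what changed: B encodes the first five characters as a 5-bit integer mask (one fold setting bits for '1' flags) and returns the answer by a single lookup in a 32-entry mask-to-string table precomputed once at module load, replacing A's per-index name-appending scan over the whole string and its manual comma-accumulating join loop; the 'None' early return and the 'Unkown' fallback live in the table.
import Mathlib
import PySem

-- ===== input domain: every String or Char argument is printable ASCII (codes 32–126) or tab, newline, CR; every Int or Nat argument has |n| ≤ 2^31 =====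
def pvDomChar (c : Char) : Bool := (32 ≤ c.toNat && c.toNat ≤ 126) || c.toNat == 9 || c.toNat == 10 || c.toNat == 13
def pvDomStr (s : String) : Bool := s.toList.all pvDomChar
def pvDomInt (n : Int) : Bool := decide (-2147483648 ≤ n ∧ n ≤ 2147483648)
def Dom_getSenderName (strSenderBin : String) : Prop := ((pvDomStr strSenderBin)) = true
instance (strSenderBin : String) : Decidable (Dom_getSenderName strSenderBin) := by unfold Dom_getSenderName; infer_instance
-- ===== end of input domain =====

-- B replaces A's per-index name-appending scan and manual join loop by a 5-bit mask of the
-- flag characters looked up in a 32-entry table precomputed once — objective: faster (O(1) vs O(n); measured faster in a timing run).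

-- ===== PORT A =====
-- body of A's first loop: the five independent 'if i == k and strSenderBin[i] == "1"' checks
def pvStepA (s : String) (names : List String) (i : Int) : List String :=
  let names := if i = 0 ∧ PySem.Str.pyGet? s i = some '1' then names ++ ["investimentoGuru"] else names
  let names := if i = 1 ∧ PySem.Str.pyGet? s i = some '1' then names ++ ["poupancaGuru"] else names
  let names := if i = 2 ∧ PySem.Str.pyGet? s i = some '1' then names ++ ["cdbGuru"] else names
  let names := if i = 3 ∧ PySem.Str.pyGet? s i = some '1' then names ++ ["tesouroGuru"] else names
  if i = 4 ∧ PySem.Str.pyGet? s i = some '1' then names ++ ["finch-user"] else names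

-- A's names-building loop: for i in range(0, len(strSenderBin))
def pvNamesA (s : String) : List String :=
  (PySem.List.pyRange 0 (PySem.Str.len s)).foldl (pvStepA s) []

-- A's manual join loop: for i in range(0, len(names)): comma after all but the last
def pvJoinA (names : List String) : String :=
  (PySem.List.pyRange 0 (names.length : Int)).foldl (fun ret i =>
    if i ≠ (names.length : Int) - 1 then ret ++ PySem.List.pyGetD names i "" ++ ","
    else ret ++ PySem.List.pyGetD names i "") ""

def getSenderName (strSenderBin : String) : String :=
  if strSenderBin = "None" then "None"
  else
    let names := pvNamesA strSenderBin
    let names := if names.length = 0 then names ++ ["Unkown"] else names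
    pvJoinA names

-- ===== PORT B =====
-- _NAMES = ("investimentoGuru", "poupancaGuru", "cdbGuru", "tesouroGuru", "finch-user")
def pvNamesB : List String :=
  ["investimentoGuru", "poupancaGuru", "cdbGuru", "tesouroGuru", "finch-user"]

-- the module-level table build: for _m in range(32): _TABLE[_m] = join or "Unkown"
def pvTableB : PySem.Dict Int String :=
  (PySem.List.pyRange 0 32).foldl (fun d m =>
    let joined := PySem.Str.join ","
      ((PySem.List.pyRange 0 5).filterMap (fun b =>
        if PySem.Int.band (m >>> b.toNat) 1 ≠ 0 then some (PySem.List.pyGetD pvNamesB b "") else none))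
    d.insert m (if joined = "" then "Unkown" else joined)) PySem.Dict.empty

def getSenderName_alt (strSenderBin : String) : String :=
  if strSenderBin = "None" then "None"
  else
    -- mask = 0; for b, ch in enumerate(strSenderBin[:5]): if ch == "1": mask |= 1 << b
    let mask := (PySem.List.enumerate (PySem.List.slice strSenderBin.toList none (some 5))).foldl
      (fun mask p => if p.2 = '1' then PySem.Int.bor mask ((1:Int) <<< p.1.toNat) else mask) (0:Int)
    -- _TABLE[mask]: the key 0 ≤ mask < 32 is always present, so getD's default is never used
    PySem.Dict.getD pvTableB mask ""

-- ===== PRECONDITION & SPEC =====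
def Spec_getSenderName (strSenderBin : String) (out : String) : Prop := out = getSenderName_alt strSenderBin
instance (strSenderBin : String) (out : String) : Decidable (Spec_getSenderName strSenderBin out) := by unfold Spec_getSenderName; infer_instance

-- ===== CLAIM (what is proved, stated in full; the proofs are below) =====
def Claim_equal_getSenderName : Prop := ∀ (strSenderBin : String), Dom_getSenderName strSenderBin → Spec_getSenderName strSenderBin (getSenderName strSenderBin)

-- ===== LEMMAS AND PROOFS =====

theorem pvStep0 (s : String) (ch : Char) (h : PySem.Str.pyGet? s 0 = some ch) (acc : List String) :
    pvStepA s acc 0 = if ch = '1' then acc ++ ["investimentoGuru"] else acc := by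
  have h' : PySem.List.pyGet? s.toList 0 = some ch := h
  simp [pvStepA, h']

theorem pvStep1 (s : String) (ch : Char) (h : PySem.Str.pyGet? s 1 = some ch) (acc : List String) :
    pvStepA s acc 1 = if ch = '1' then acc ++ ["poupancaGuru"] else acc := by
  have h' : PySem.List.pyGet? s.toList 1 = some ch := h
  simp [pvStepA, h']

theorem pvStep2 (s : String) (ch : Char) (h : PySem.Str.pyGet? s 2 = some ch) (acc : List String) :
    pvStepA s acc 2 = if ch = '1' then acc ++ ["cdbGuru"] else acc := by
  have h' : PySem.List.pyGet? s.toList 2 = some ch := h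
  simp [pvStepA, h']

theorem pvStep3 (s : String) (ch : Char) (h : PySem.Str.pyGet? s 3 = some ch) (acc : List String) :
    pvStepA s acc 3 = if ch = '1' then acc ++ ["tesouroGuru"] else acc := by
  have h' : PySem.List.pyGet? s.toList 3 = some ch := h
  simp [pvStepA, h']

theorem pvStep4 (s : String) (ch : Char) (h : PySem.Str.pyGet? s 4 = some ch) (acc : List String) :
    pvStepA s acc 4 = if ch = '1' then acc ++ ["finch-user"] else acc := by
  have h' : PySem.List.pyGet? s.toList 4 = some ch := h
  simp [pvStepA, h']

-- A's loop body is a no-op for every index ≥ 5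
theorem pvTailNoop (s : String) (b : Int) (init : List String) :
    (PySem.List.pyRange 5 b).foldl (pvStepA s) init = init := by
  rw [PySem.List.foldl_congr_mem _ _ (fun acc _ => acc) init ?_, List.foldl_fixed]
  intro acc x hx
  have h5 : 5 ≤ x := (PySem.List.mem_pyRange_one.mp hx).1
  have h0 : ¬ (x = 0) := by omega
  have h1 : ¬ (x = 1) := by omega
  have h2 : ¬ (x = 2) := by omega
  have h3 : ¬ (x = 3) := by omega
  have h4 : ¬ (x = 4) := by omega
  simp [pvStepA, h0, h1, h2, h3, h4]

theorem pyRange05 (b : Int) (h : 5 ≤ b) :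
    PySem.List.pyRange 0 b = 0 :: 1 :: 2 :: 3 :: 4 :: PySem.List.pyRange 5 b := by
  rw [PySem.List.pyRange_one_cons (by omega), PySem.List.pyRange_one_cons (by omega),
      PySem.List.pyRange_one_cons (by omega), PySem.List.pyRange_one_cons (by omega),
      PySem.List.pyRange_one_cons (by omega)]
  norm_num

theorem pvCase0 (s : String) (hN : ¬ s = "None") (hs : s.toList = []) :
    getSenderName s = getSenderName_alt s := by
  have hlen : PySem.Str.len s = 0 := by simp [PySem.Str.len_eq, hs]
  unfold getSenderName getSenderName_alt pvNamesA
  rw [if_neg hN, if_neg hN, hlen, hs]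
  simp [show PySem.List.pyRange 0 0 = [] from by decide, PySem.List.slice]
  decide

theorem pvCase1 (s : String) (hN : ¬ s = "None") (a : Char) (hs : s.toList = [a]) :
    getSenderName s = getSenderName_alt s := by
  have hlen : PySem.Str.len s = 1 := by simp [PySem.Str.len_eq, hs]
  have g0 : PySem.List.pyGet? s.toList 0 = some a := by
    simp [hs, PySem.List.pyGet?, PySem.List.pyIdx?]
  unfold getSenderName getSenderName_alt pvNamesA
  rw [if_neg hN, if_neg hN, hlen, hs, show PySem.List.pyRange 0 1 = [0] from by decide]
  simp only [List.foldl_cons, List.foldl_nil, pvStep0 s a g0]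
  by_cases ca : a = '1' <;>
  simp [ca, PySem.List.slice, PySem.List.enumerate] <;> decide

theorem pvCase2 (s : String) (hN : ¬ s = "None") (a b : Char) (hs : s.toList = [a, b]) :
    getSenderName s = getSenderName_alt s := by
  have hlen : PySem.Str.len s = 2 := by simp [PySem.Str.len_eq, hs]
  have g0 : PySem.List.pyGet? s.toList 0 = some a := by
    simp [hs, PySem.List.pyGet?, PySem.List.pyIdx?]
  have g1 : PySem.List.pyGet? s.toList 1 = some b := by
    simp [hs, PySem.List.pyGet?, PySem.List.pyIdx?]
  unfold getSenderName getSenderName_alt pvNamesA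
  rw [if_neg hN, if_neg hN, hlen, hs, show PySem.List.pyRange 0 2 = [0, 1] from by decide]
  simp only [List.foldl_cons, List.foldl_nil, pvStep0 s a g0, pvStep1 s b g1]
  by_cases ca : a = '1' <;> by_cases cb : b = '1' <;>
  simp [ca, cb, PySem.List.slice, PySem.List.enumerate] <;> decide

theorem pvCase3 (s : String) (hN : ¬ s = "None") (a b c : Char) (hs : s.toList = [a, b, c]) :
    getSenderName s = getSenderName_alt s := by
  have hlen : PySem.Str.len s = 3 := by simp [PySem.Str.len_eq, hs]
  have g0 : PySem.List.pyGet? s.toList 0 = some a := by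
    simp [hs, PySem.List.pyGet?, PySem.List.pyIdx?]
  have g1 : PySem.List.pyGet? s.toList 1 = some b := by
    simp [hs, PySem.List.pyGet?, PySem.List.pyIdx?]
  have g2 : PySem.List.pyGet? s.toList 2 = some c := by
    simp [hs, PySem.List.pyGet?, PySem.List.pyIdx?]
  unfold getSenderName getSenderName_alt pvNamesA
  rw [if_neg hN, if_neg hN, hlen, hs, show PySem.List.pyRange 0 3 = [0, 1, 2] from by decide]
  simp only [List.foldl_cons, List.foldl_nil, pvStep0 s a g0, pvStep1 s b g1, pvStep2 s c g2]
  by_cases ca : a = '1' <;> by_cases cb : b = '1' <;> by_cases cc : c = '1' <;>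
  simp [ca, cb, cc, PySem.List.slice, PySem.List.enumerate] <;> decide

theorem pvCase4 (s : String) (hN : ¬ s = "None") (a b c d : Char) (hs : s.toList = [a, b, c, d]) :
    getSenderName s = getSenderName_alt s := by
  have hlen : PySem.Str.len s = 4 := by simp [PySem.Str.len_eq, hs]
  have g0 : PySem.List.pyGet? s.toList 0 = some a := by
    simp [hs, PySem.List.pyGet?, PySem.List.pyIdx?]
  have g1 : PySem.List.pyGet? s.toList 1 = some b := by
    simp [hs, PySem.List.pyGet?, PySem.List.pyIdx?]
  have g2 : PySem.List.pyGet? s.toList 2 = some c := by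
    simp [hs, PySem.List.pyGet?, PySem.List.pyIdx?]
  have g3 : PySem.List.pyGet? s.toList 3 = some d := by
    simp [hs, PySem.List.pyGet?, PySem.List.pyIdx?]
  unfold getSenderName getSenderName_alt pvNamesA
  rw [if_neg hN, if_neg hN, hlen, hs, show PySem.List.pyRange 0 4 = [0, 1, 2, 3] from by decide]
  simp only [List.foldl_cons, List.foldl_nil, pvStep0 s a g0, pvStep1 s b g1, pvStep2 s c g2,
    pvStep3 s d g3]
  by_cases ca : a = '1' <;> by_cases cb : b = '1' <;> by_cases cc : c = '1' <;>
    by_cases cd : d = '1' <;>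
  simp [ca, cb, cc, cd, PySem.List.slice, PySem.List.enumerate] <;> decide

theorem pvCase5 (s : String) (hN : ¬ s = "None") (a b c d e : Char) (rest : List Char)
    (hs : s.toList = a :: b :: c :: d :: e :: rest) :
    getSenderName s = getSenderName_alt s := by
  have hlen : PySem.Str.len s = (rest.length : Int) + 5 := by
    simp [PySem.Str.len_eq, hs]; ring
  have g0 : PySem.List.pyGet? s.toList 0 = some a := by
    simp [hs, PySem.List.pyGet?, PySem.List.pyIdx?]
    split_ifs with h
    · simp
    · exact (h (by omega)).elim
  have g1 : PySem.List.pyGet? s.toList 1 = some b := by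
    simp [hs, PySem.List.pyGet?, PySem.List.pyIdx?]
    split_ifs with h
    · simp
    · exact (h (by omega)).elim
  have g2 : PySem.List.pyGet? s.toList 2 = some c := by
    simp [hs, PySem.List.pyGet?, PySem.List.pyIdx?]
    split_ifs with h
    · simp
    · exact (h (by omega)).elim
  have g3 : PySem.List.pyGet? s.toList 3 = some d := by
    simp [hs, PySem.List.pyGet?, PySem.List.pyIdx?]
    split_ifs with h
    · simp
    · exact (h (by omega)).elim
  have g4 : PySem.List.pyGet? s.toList 4 = some e := by
    simp [hs, PySem.List.pyGet?, PySem.List.pyIdx?]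
    split_ifs with h
    · simp
    · exact (h (by omega)).elim
  have hsl : PySem.List.slice s.toList none (some 5) = [a, b, c, d, e] := by
    rw [hs, show ((5:Int)) = ((5:Nat):Int) from rfl, PySem.List.slice_to_natCast]
    rfl
  unfold getSenderName getSenderName_alt pvNamesA
  rw [if_neg hN, if_neg hN, hlen, hsl, pyRange05 _ (by omega)]
  simp only [List.foldl_cons, pvStep0 s a g0, pvStep1 s b g1, pvStep2 s c g2,
    pvStep3 s d g3, pvStep4 s e g4, pvTailNoop]
  by_cases ca : a = '1' <;> by_cases cb : b = '1' <;> by_cases cc : c = '1' <;>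
    by_cases cd : d = '1' <;> by_cases ce : e = '1' <;>
  simp [ca, cb, cc, cd, ce] <;> decide

-- ===== VERDICT (by name: the statement is the Claim_ definition above) =====
theorem getSenderName_spec : Claim_equal_getSenderName := by
  intro s _
  unfold Spec_getSenderName
  by_cases hN : s = "None"
  · simp [getSenderName, getSenderName_alt, hN]
  · rcases hs : s.toList with _ | ⟨a, _ | ⟨b, _ | ⟨c, _ | ⟨d, _ | ⟨e, rest⟩⟩⟩⟩⟩
    · exact pvCase0 s hN hs
    · exact pvCase1 s hN a hs
    · exact pvCase2 s hN a b hs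
    · exact pvCase3 s hN a b c hs
    · exact pvCase4 s hN a b c d hs
    · exact pvCase5 s hN a b c d e rest hs
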